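-- pv_equiv track=rewrite | github.com/SimonOuellette35/ARC-AGI_TaskDB_Tools | dreaming/dreaming_data_generator.py | _ends_with_arg_min_or_max
-- ===== SOURCE A (Python) =====
-- def _ends_with_arg_min_or_max(prog_instrs):
--     """Check if a program ends with an arg_min or arg_max instruction.
--
--     Args:
--         prog_instrs: List of instruction strings
--
--     Returns:
--         True if the program has an arg_min or arg_max instruction followed only by del statements (or nothing), False otherwise
--     """
--     if not prog_instrs:
--         return False
--
--     # Iterate backwards from the end, skipping del statements
--     for i in range(len(prog_instrs) - 1, -1, -1):
--         instr = prog_instrs[i]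
--         if instr.startswith('del('):
--             # Skip del statements
--             continue
--         # Found a non-del instruction - check if it's arg_min or arg_max
--         if 'arg_min(' in instr or 'arg_max(' in instr:
--             return True
--
--         if instr.startswith('rebuild_grid('):
--             return False
--
--     # All instructions were del statements (shouldn't happen, but handle it)
--     return False
-- ===== SOURCE B (Python) =====
-- def _relevant(instr):
--     """An instruction that decides the answer: not a del, and either an
--     arg_min/arg_max occurrence or a rebuild_grid instruction."""
--     return (not instr.startswith('del(')) and (
--         'arg_min(' in instr or 'arg_max(' in instr
--         or instr.startswith('rebuild_grid('))
--
--
-- def _ends_with_arg_min_or_max(prog_instrs):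
--     """Filter to the deciding instructions, then classify only the last one."""
--     deciders = [i for i in prog_instrs if _relevant(i)]
--     if not deciders:
--         return False
--     last = deciders[-1]
--     return 'arg_min(' in last or 'arg_max(' in last
-- ===== Notes on version B (the rewrite author's own statement) =====
-- stated objective: simpler
-- what changed: Replaces A's backward index loop with early returns by a filter-then-classify decomposition: keep only the deciding instructions (non-del containing arg_min(/arg_max( or starting with rebuild_grid() and test just the last one.
import Mathlib
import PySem

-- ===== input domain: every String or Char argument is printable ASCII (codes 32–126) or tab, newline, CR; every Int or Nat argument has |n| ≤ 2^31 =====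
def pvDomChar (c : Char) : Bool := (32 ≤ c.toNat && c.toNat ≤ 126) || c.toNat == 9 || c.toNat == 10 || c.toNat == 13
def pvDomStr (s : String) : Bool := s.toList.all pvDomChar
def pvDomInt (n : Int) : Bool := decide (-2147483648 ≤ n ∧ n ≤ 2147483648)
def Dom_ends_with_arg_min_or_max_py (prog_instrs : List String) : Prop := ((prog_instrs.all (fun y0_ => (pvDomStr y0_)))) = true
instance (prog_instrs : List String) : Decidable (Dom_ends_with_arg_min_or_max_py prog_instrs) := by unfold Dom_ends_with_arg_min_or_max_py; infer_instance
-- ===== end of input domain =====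

-- B replaces A's backward early-return loop by filter-then-classify-the-last (simpler; same O(n) cost).

-- ===== PORT A =====
-- A iterates the instructions backwards (range(len-1, -1, -1)) and returns at the
-- first deciding instruction; ported as the obvious structural recursion over the
-- reversed list (same instructions, same order, same branch order).
def pvALoop : List String → Bool
  | [] => false   -- loop fell through: return False
  | instr :: rest =>
    if PySem.Str.startswith instr "del(" then pvALoop rest
    else if PySem.Str.isIn "arg_min(" instr || PySem.Str.isIn "arg_max(" instr then true
    else if PySem.Str.startswith instr "rebuild_grid(" then false
    else pvALoop rest

def ends_with_arg_min_or_max_py (prog_instrs : List String) : Bool :=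
  if prog_instrs = [] then false
  else pvALoop prog_instrs.reverse

-- ===== PORT B =====
def pvRelevant (instr : String) : Bool :=
  !(PySem.Str.startswith instr "del(") &&
    (PySem.Str.isIn "arg_min(" instr || PySem.Str.isIn "arg_max(" instr
      || PySem.Str.startswith instr "rebuild_grid(")

def ends_with_arg_min_or_max_py_alt (prog_instrs : List String) : Bool :=
  match (prog_instrs.filter pvRelevant).getLast? with
  | none => false
  | some last => PySem.Str.isIn "arg_min(" last || PySem.Str.isIn "arg_max(" last

-- ===== PRECONDITION & SPEC =====
def Spec_ends_with_arg_min_or_max_py (prog_instrs : List String) (out : Bool) : Prop := out = ends_with_arg_min_or_max_py_alt prog_instrs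
instance (prog_instrs : List String) (out : Bool) : Decidable (Spec_ends_with_arg_min_or_max_py prog_instrs out) := by unfold Spec_ends_with_arg_min_or_max_py; infer_instance

-- ===== CLAIM (what is proved, stated in full; the proofs are below) =====
def Claim_equal_ends_with_arg_min_or_max_py : Prop := ∀ (prog_instrs : List String), Dom_ends_with_arg_min_or_max_py prog_instrs → Spec_ends_with_arg_min_or_max_py prog_instrs (ends_with_arg_min_or_max_py prog_instrs)

-- ===== LEMMAS AND PROOFS =====

-- A's backward early-return scan equals B's "classify the last relevant instruction".
theorem pvALoop_reverse_eq_alt (l : List String) :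
    pvALoop l.reverse = ends_with_arg_min_or_max_py_alt l := by
  induction l using List.reverseRecOn with
  | nil => rfl
  | append_singleton m x ih =>
    rw [List.reverse_append, List.reverse_singleton, List.singleton_append]
    simp only [pvALoop, ends_with_arg_min_or_max_py_alt, List.filter_append,
      List.filter_singleton]
    simp only [ends_with_arg_min_or_max_py_alt] at ih
    cases hdel : PySem.Str.startswith x "del(" with
    | true =>
      have hrel : pvRelevant x = false := by unfold pvRelevant; rw [hdel]; rfl
      rw [if_pos rfl, hrel, cond_false, List.append_nil]
      exact ih
    | false =>
      rw [if_neg Bool.false_ne_true]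
      cases h1 : PySem.Str.isIn "arg_min(" x with
      | true =>
        have hrel : pvRelevant x = true := by unfold pvRelevant; rw [hdel, h1]; rfl
        rw [Bool.true_or, if_pos rfl, hrel, cond_true, List.getLast?_concat]
        show true = (PySem.Str.isIn "arg_min(" x || PySem.Str.isIn "arg_max(" x)
        rw [h1, Bool.true_or]
      | false =>
        cases h2 : PySem.Str.isIn "arg_max(" x with
        | true =>
          have hrel : pvRelevant x = true := by unfold pvRelevant; rw [hdel, h1, h2]; rfl
          rw [Bool.false_or, if_pos rfl, hrel, cond_true, List.getLast?_concat]
          show true = (PySem.Str.isIn "arg_min(" x || PySem.Str.isIn "arg_max(" x)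
          rw [h1, h2, Bool.false_or]
        | false =>
          rw [Bool.false_or, if_neg Bool.false_ne_true]
          cases hrb : PySem.Str.startswith x "rebuild_grid(" with
          | true =>
            have hrel : pvRelevant x = true := by unfold pvRelevant; rw [hdel, h1, h2, hrb]; rfl
            rw [if_pos rfl, hrel, cond_true, List.getLast?_concat]
            show false = (PySem.Str.isIn "arg_min(" x || PySem.Str.isIn "arg_max(" x)
            rw [h1, h2, Bool.false_or]
          | false =>
            have hrel : pvRelevant x = false := by unfold pvRelevant; rw [hdel, h1, h2, hrb]; rfl
            rw [if_neg Bool.false_ne_true, hrel, cond_false, List.append_nil]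
            exact ih

-- ===== VERDICT (by name: the statement is the Claim_ definition above) =====
theorem ends_with_arg_min_or_max_py_spec : Claim_equal_ends_with_arg_min_or_max_py := by
  intro prog_instrs _
  unfold Spec_ends_with_arg_min_or_max_py ends_with_arg_min_or_max_py
  rcases prog_instrs with _ | ⟨x, xs⟩
  · rfl
  · rw [if_neg (List.cons_ne_nil x xs)]
    exact pvALoop_reverse_eq_alt (x :: xs)
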